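-- pv_equiv track=rewrite | github.com/WatchThisFirewall/WTF.v1 | app/views.py | Color_Line
-- ===== SOURCE A (Python) =====
-- def Color_Line(IN_Line):
--     Red_Words    = ['no', 'NEW','|','i','ip','any','any4','clear','tcp','udp','ip','icmp','deny','(hitcnt=0)','inactive','shutdown','address','standby','route','ssh','circular-buffer','[Capturing','0']
--     Blu_Words    = ['interface','access-group','access-list','host','network','nat','route','show','run','unidirectional']
--     Green_Words  = ['in','log','description','logging','permit']
--     Purple_Words = ['configure', 'extended', 'service','protocol','capture']
--     Brown_Words  = ['network-object','source','dynamic','static','destination','object-group','object','port-object','policy-map','match','to','eq','line','range']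
--     Red_Color    = '#ba1e28'
--     Blu_Color    = '#1e25ba'
--     Green_Color  = '#1cb836'
--     Purple_Color = '#8f1489'
--     Brown_Color  = '#995c00'
--
--     OUT_Line = ''
--     for t_word in IN_Line.split():
--         if t_word in Blu_Words:
--             OUT_Line = OUT_Line + '<font color="%s"> %s </font>' %(Blu_Color, t_word)
--         elif t_word in Red_Words:
--             OUT_Line = OUT_Line + '<font color="%s"> %s </font>' %(Red_Color, t_word)
--         elif t_word in Green_Words:
--             OUT_Line = OUT_Line + '<font color="%s"> %s </font>' %(Green_Color, t_word)
--         elif t_word in Purple_Words: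
--             OUT_Line = OUT_Line + '<font color="%s"> %s </font>' %(Purple_Color, t_word)
--         elif t_word in Brown_Words:
--             OUT_Line = OUT_Line + '<font color="%s"> %s </font>' %(Brown_Color, t_word)
--         else:
--             OUT_Line = OUT_Line + '%s ' %t_word
--     return OUT_Line
-- ===== SOURCE B (Python) =====
-- def Color_Line(IN_Line):
--     # Fused single pass over the characters: no split(), the current word is
--     # accumulated and rendered at each whitespace boundary via one
--     # word->color table (built in reverse priority order so later inserts win).
--     groups = [
--         (['network-object','source','dynamic','static','destination','object-group','object','port-object','policy-map','match','to','eq','line','range'], '#995c00'),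
--         (['configure', 'extended', 'service','protocol','capture'], '#8f1489'),
--         (['in','log','description','logging','permit'], '#1cb836'),
--         (['no', 'NEW','|','i','ip','any','any4','clear','tcp','udp','ip','icmp','deny','(hitcnt=0)','inactive','shutdown','address','standby','route','ssh','circular-buffer','[Capturing','0'], '#ba1e28'),
--         (['interface','access-group','access-list','host','network','nat','route','show','run','unidirectional'], '#1e25ba'),
--     ]
--     color = {}
--     for words, c in groups:
--         for w in words:
--             color[w] = c
--
--     def render(w):
--         c = color.get(w)
--         if c is not None:
--             return '<font color="%s"> %s </font>' % (c, w)
--         return w + ' '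
--
--     parts = []
--     word = ''
--     for ch in IN_Line:
--         if ch.isspace():
--             if word:
--                 parts.append(render(word))
--                 word = ''
--         else:
--             word += ch
--     if word:
--         parts.append(render(word))
--     return ''.join(parts)
-- ===== Notes on version B (the rewrite author's own statement) =====
-- stated objective: alternative
-- what changed: B replaces A's split()-then-loop with five sequential list-membership branches by a fused single character-level scan (a word buffer flushed at each whitespace boundary, rendered fragments collected in a list and joined at the end) that decides the color with one word-to-color table built in reverse priority order.
import Mathlib
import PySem

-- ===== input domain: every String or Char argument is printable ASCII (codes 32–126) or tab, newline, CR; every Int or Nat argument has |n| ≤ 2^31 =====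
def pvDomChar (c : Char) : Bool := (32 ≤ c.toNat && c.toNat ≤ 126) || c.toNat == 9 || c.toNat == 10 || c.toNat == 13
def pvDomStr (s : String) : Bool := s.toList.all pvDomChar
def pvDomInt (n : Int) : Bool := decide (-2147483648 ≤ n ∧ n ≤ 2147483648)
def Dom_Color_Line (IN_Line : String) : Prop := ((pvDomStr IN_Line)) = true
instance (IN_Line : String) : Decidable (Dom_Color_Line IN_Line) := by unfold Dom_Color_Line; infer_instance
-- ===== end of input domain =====

set_option maxRecDepth 100000

-- B is a fused single character-level pass (no split, a word buffer flushed at whitespace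
-- boundaries, fragments joined at the end) with one word→color table; objective: alternative.

-- ===== PORT A =====
def pvRed_Words : List String := ["no", "NEW", "|", "i", "ip", "any", "any4", "clear", "tcp", "udp", "ip", "icmp", "deny", "(hitcnt=0)", "inactive", "shutdown", "address", "standby", "route", "ssh", "circular-buffer", "[Capturing", "0"]
def pvBlu_Words : List String := ["interface", "access-group", "access-list", "host", "network", "nat", "route", "show", "run", "unidirectional"]
def pvGreen_Words : List String := ["in", "log", "description", "logging", "permit"]
def pvPurple_Words : List String := ["configure", "extended", "service", "protocol", "capture"]
def pvBrown_Words : List String := ["network-object", "source", "dynamic", "static", "destination", "object-group", "object", "port-object", "policy-map", "match", "to", "eq", "line", "range"]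
def pvRed_Color : String := "#ba1e28"
def pvBlu_Color : String := "#1e25ba"
def pvGreen_Color : String := "#1cb836"
def pvPurple_Color : String := "#8f1489"
def pvBrown_Color : String := "#995c00"

def Color_Line (IN_Line : String) : String :=
  (PySem.Str.split₀ IN_Line).foldl (fun OUT_Line t_word =>
    if t_word ∈ pvBlu_Words then
      OUT_Line ++ "<font color=\"" ++ pvBlu_Color ++ "\"> " ++ t_word ++ " </font>"
    else if t_word ∈ pvRed_Words then
      OUT_Line ++ "<font color=\"" ++ pvRed_Color ++ "\"> " ++ t_word ++ " </font>"
    else if t_word ∈ pvGreen_Words then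
      OUT_Line ++ "<font color=\"" ++ pvGreen_Color ++ "\"> " ++ t_word ++ " </font>"
    else if t_word ∈ pvPurple_Words then
      OUT_Line ++ "<font color=\"" ++ pvPurple_Color ++ "\"> " ++ t_word ++ " </font>"
    else if t_word ∈ pvBrown_Words then
      OUT_Line ++ "<font color=\"" ++ pvBrown_Color ++ "\"> " ++ t_word ++ " </font>"
    else
      OUT_Line ++ t_word ++ " ") ""

-- ===== PORT B =====
def pvGroups : List (List String × String) :=
  [ (["network-object", "source", "dynamic", "static", "destination", "object-group", "object", "port-object", "policy-map", "match", "to", "eq", "line", "range"], "#995c00"),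
    (["configure", "extended", "service", "protocol", "capture"], "#8f1489"),
    (["in", "log", "description", "logging", "permit"], "#1cb836"),
    (["no", "NEW", "|", "i", "ip", "any", "any4", "clear", "tcp", "udp", "ip", "icmp", "deny", "(hitcnt=0)", "inactive", "shutdown", "address", "standby", "route", "ssh", "circular-buffer", "[Capturing", "0"], "#ba1e28"),
    (["interface", "access-group", "access-list", "host", "network", "nat", "route", "show", "run", "unidirectional"], "#1e25ba") ]

def pvColorTable : PySem.Dict String String :=
  pvGroups.foldl (fun d g => g.1.foldl (fun d w => d.insert w g.2) d) PySem.Dict.empty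

def pvRender (w : String) : String :=
  match pvColorTable.get? w with
  | some c => "<font color=\"" ++ c ++ "\"> " ++ w ++ " </font>"
  | none => w ++ " "

-- the fused scan: `cur` is the current word buffer, `parts` the rendered fragments so far
def pvScan (cs : List Char) (cur : List Char) (parts : List String) : List String :=
  match cs with
  | [] => if cur.isEmpty then parts else parts ++ [pvRender (String.ofList cur)]
  | c :: rest =>
    if PySem.Chars.isspace c then
      if cur.isEmpty then pvScan rest [] parts
      else pvScan rest [] (parts ++ [pvRender (String.ofList cur)])
    else pvScan rest (cur ++ [c]) parts

def Color_Line_alt (IN_Line : String) : String :=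
  String.join (pvScan IN_Line.toList [] [])

-- ===== PRECONDITION & SPEC =====
def Spec_Color_Line (IN_Line : String) (out : String) : Prop := out = Color_Line_alt IN_Line
instance (IN_Line : String) (out : String) : Decidable (Spec_Color_Line IN_Line out) := by unfold Spec_Color_Line; infer_instance

-- ===== CLAIM (what is proved, stated in full; the proofs are below) =====
def Claim_equal_Color_Line : Prop := ∀ (IN_Line : String), Dom_Color_Line IN_Line → Spec_Color_Line IN_Line (Color_Line IN_Line)

-- ===== LEMMAS AND PROOFS =====

-- the table's lookup is exactly A's branch chain
lemma pvTable_get (w : String) :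
    pvColorTable.get? w =
      (if w ∈ pvBlu_Words then some pvBlu_Color
       else if w ∈ pvRed_Words then some pvRed_Color
       else if w ∈ pvGreen_Words then some pvGreen_Color
       else if w ∈ pvPurple_Words then some pvPurple_Color
       else if w ∈ pvBrown_Words then some pvBrown_Color
       else none) := by
  by_cases hB : w ∈ pvBlu_Words
  · simp only [hB, if_true]
    simp only [pvBlu_Words, List.mem_cons, List.not_mem_nil, or_false] at hB
    rcases hB with rfl | rfl | rfl | rfl | rfl | rfl | rfl | rfl | rfl | rfl <;> decide
  · by_cases hR : w ∈ pvRed_Words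
    · simp only [hB, if_false, hR, if_true]
      simp only [pvRed_Words, List.mem_cons, List.not_mem_nil, or_false] at hR
      rcases hR with rfl | rfl | rfl | rfl | rfl | rfl | rfl | rfl | rfl | rfl | rfl | rfl | rfl | rfl | rfl | rfl | rfl | rfl | rfl | rfl | rfl | rfl | rfl
      all_goals first | decide | (exact absurd (by decide) hB)
    · by_cases hG : w ∈ pvGreen_Words
      · simp only [hB, hR, if_false, hG, if_true]
        simp only [pvGreen_Words, List.mem_cons, List.not_mem_nil, or_false] at hG
        rcases hG with rfl | rfl | rfl | rfl | rfl <;> decide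
      · by_cases hP : w ∈ pvPurple_Words
        · simp only [hB, hR, hG, if_false, hP, if_true]
          simp only [pvPurple_Words, List.mem_cons, List.not_mem_nil, or_false] at hP
          rcases hP with rfl | rfl | rfl | rfl | rfl <;> decide
        · by_cases hBr : w ∈ pvBrown_Words
          · simp only [hB, hR, hG, hP, if_false, hBr, if_true]
            simp only [pvBrown_Words, List.mem_cons, List.not_mem_nil, or_false] at hBr
            rcases hBr with rfl | rfl | rfl | rfl | rfl | rfl | rfl | rfl | rfl | rfl | rfl | rfl | rfl | rfl <;> decide
          · simp only [hB, hR, hG, hP, hBr, if_false]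
            rw [PySem.Dict.get?_eq_none_iff_not_mem_keys]
            intro hmem
            have hsub : ∀ x ∈ pvColorTable.keys,
                x ∈ pvBlu_Words ∨ x ∈ pvRed_Words ∨ x ∈ pvGreen_Words ∨ x ∈ pvPurple_Words ∨ x ∈ pvBrown_Words := by
              decide
            rcases hsub w hmem with h | h | h | h | h
            exacts [hB h, hR h, hG h, hP h, hBr h]

-- A's loop body is "append pvRender t_word"
lemma pvBodyA (OUT_Line t_word : String) :
    (if t_word ∈ pvBlu_Words then
      OUT_Line ++ "<font color=\"" ++ pvBlu_Color ++ "\"> " ++ t_word ++ " </font>"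
    else if t_word ∈ pvRed_Words then
      OUT_Line ++ "<font color=\"" ++ pvRed_Color ++ "\"> " ++ t_word ++ " </font>"
    else if t_word ∈ pvGreen_Words then
      OUT_Line ++ "<font color=\"" ++ pvGreen_Color ++ "\"> " ++ t_word ++ " </font>"
    else if t_word ∈ pvPurple_Words then
      OUT_Line ++ "<font color=\"" ++ pvPurple_Color ++ "\"> " ++ t_word ++ " </font>"
    else if t_word ∈ pvBrown_Words then
      OUT_Line ++ "<font color=\"" ++ pvBrown_Color ++ "\"> " ++ t_word ++ " </font>"
    else
      OUT_Line ++ t_word ++ " ") = OUT_Line ++ pvRender t_word := by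
  unfold pvRender
  rw [pvTable_get t_word]
  split_ifs <;> simp [String.append_assoc]

-- folding append from `a` is `a ++` the fold from ""
lemma pvFoldl_append (l : List String) (a : String) :
    l.foldl (fun r s => r ++ s) a = a ++ l.foldl (fun r s => r ++ s) "" := by
  induction l generalizing a with
  | nil => simp
  | cons x xs ih =>
    simp only [List.foldl_cons]
    rw [ih (a ++ x), ih ((_ : String) ++ x)]
    simp [String.append_assoc]

-- A's fold is the join of the rendered words
lemma pvFoldA (ws : List String) (acc : String) :
    ws.foldl (fun OUT_Line t_word =>
      if t_word ∈ pvBlu_Words then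
        OUT_Line ++ "<font color=\"" ++ pvBlu_Color ++ "\"> " ++ t_word ++ " </font>"
      else if t_word ∈ pvRed_Words then
        OUT_Line ++ "<font color=\"" ++ pvRed_Color ++ "\"> " ++ t_word ++ " </font>"
      else if t_word ∈ pvGreen_Words then
        OUT_Line ++ "<font color=\"" ++ pvGreen_Color ++ "\"> " ++ t_word ++ " </font>"
      else if t_word ∈ pvPurple_Words then
        OUT_Line ++ "<font color=\"" ++ pvPurple_Color ++ "\"> " ++ t_word ++ " </font>"
      else if t_word ∈ pvBrown_Words then
        OUT_Line ++ "<font color=\"" ++ pvBrown_Color ++ "\"> " ++ t_word ++ " </font>"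
      else
        OUT_Line ++ t_word ++ " ") acc = acc ++ String.join (ws.map pvRender) := by
  induction ws generalizing acc with
  | nil => simp [String.join]
  | cons w ws ih =>
    simp only [List.foldl_cons, List.map_cons, String.join]
    rw [pvBodyA, ih]
    simp only [String.join]
    rw [pvFoldl_append (ws.map pvRender) ("" ++ pvRender w)]
    simp [String.append_assoc]

-- split₀.go's accumulator comes out reversed in front
lemma pvSplitGo_acc (cs : List Char) (cur : List Char) (acc : List (List Char)) :
    PySem.Chars.split₀.go cs cur acc = acc.reverse ++ PySem.Chars.split₀.go cs cur [] := by
  induction cs generalizing cur acc with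
  | nil =>
    simp only [PySem.Chars.split₀.go]
    split_ifs <;> simp
  | cons c rest ih =>
    simp only [PySem.Chars.split₀.go]
    split_ifs with h1 h2
    · exact ih _ _
    · rw [ih _ (cur.reverse :: acc), ih _ [cur.reverse]]
      simp
    · exact ih _ _

-- B's fused scan produces exactly the rendered words of split₀.go
lemma pvScan_eq (cs : List Char) (cur : List Char) (parts : List String) :
    pvScan cs cur parts =
      parts ++ (PySem.Chars.split₀.go cs cur.reverse []).map (fun w => pvRender (String.ofList w)) := by
  induction cs generalizing cur parts with
  | nil =>
    simp only [pvScan, PySem.Chars.split₀.go]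
    by_cases h : cur.isEmpty
    · simp [List.isEmpty_iff.mp h]
    · have : cur.reverse.isEmpty = false := by
        simp only [List.isEmpty_iff] at *; simpa using h
      simp [h, this]
  | cons c rest ih =>
    simp only [pvScan, PySem.Chars.split₀.go]
    by_cases hs : PySem.Chars.isspace c
    · by_cases h : cur.isEmpty
      · simp [hs, List.isEmpty_iff.mp h, ih]
      · have hrev : cur.reverse.isEmpty = false := by
          simp only [List.isEmpty_iff] at *; simpa using h
        simp only [hs, if_true, h, hrev, Bool.false_eq_true, if_false, List.reverse_reverse]
        rw [ih, pvSplitGo_acc rest [] [cur]]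
        simp
    · simp only [Bool.not_eq_true] at hs
      simp only [hs, Bool.false_eq_true, if_false]
      rw [ih]
      simp [List.reverse_append]

-- ===== VERDICT (by name: the statement is the Claim_ definition above) =====
theorem Color_Line_spec : Claim_equal_Color_Line := by
  intro IN_Line _
  unfold Spec_Color_Line Color_Line Color_Line_alt
  rw [pvFoldA, pvScan_eq]
  simp only [List.nil_append, List.reverse_nil]
  rw [PySem.Str.split₀]
  simp [PySem.Chars.split₀, List.map_map, Function.comp_def]
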